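-- pv_equiv track=rewrite | github.com/zhang0098/jpxstockdatadl | src/jpxstockdatadl/helper.py | pick_xbrl_member
-- ===== SOURCE A (Python) =====
-- def pick_xbrl_member(names: list[str]) -> str:
--     public_doc_xbrl = [
--         name for name in names if "/PublicDoc/" in name and name.endswith(".xbrl")
--     ]
--     if public_doc_xbrl:
--         return public_doc_xbrl[0]
--
--     any_xbrl = [name for name in names if name.endswith(".xbrl")]
--     if any_xbrl:
--         return any_xbrl[0]
--
--     ixbrl_html = [
--         name for name in names if name.endswith(("_ixbrl.htm", "_ixbrl.html"))
--     ]
--     if ixbrl_html: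
--         return ixbrl_html[0]
--
--     raise FileNotFoundError("No XBRL or iXBRL file found in archive")
-- ===== SOURCE B (Python) =====
-- def pick_xbrl_member(names: list[str]) -> str:
--     # one pass: keep the first match per priority tier, break on a tier-1 hit
--     t1 = t2 = t3 = None
--     for name in names:
--         if "/PublicDoc/" in name and name.endswith(".xbrl"):
--             t1 = name
--             break
--         if t2 is None and name.endswith(".xbrl"):
--             t2 = name
--         if t3 is None and name.endswith(("_ixbrl.htm", "_ixbrl.html")):
--             t3 = name
--     result = t1 if t1 is not None else t2 if t2 is not None else t3
--     if result is None:
--         raise FileNotFoundError("No XBRL or iXBRL file found in archive")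
--     return result
-- ===== Notes on version B (the rewrite author's own statement) =====
-- stated objective: faster
-- what changed: Replaces the three full list-comprehension passes with a single pass that records the first match of each priority tier and breaks early on a tier-1 hit.
import Mathlib
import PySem

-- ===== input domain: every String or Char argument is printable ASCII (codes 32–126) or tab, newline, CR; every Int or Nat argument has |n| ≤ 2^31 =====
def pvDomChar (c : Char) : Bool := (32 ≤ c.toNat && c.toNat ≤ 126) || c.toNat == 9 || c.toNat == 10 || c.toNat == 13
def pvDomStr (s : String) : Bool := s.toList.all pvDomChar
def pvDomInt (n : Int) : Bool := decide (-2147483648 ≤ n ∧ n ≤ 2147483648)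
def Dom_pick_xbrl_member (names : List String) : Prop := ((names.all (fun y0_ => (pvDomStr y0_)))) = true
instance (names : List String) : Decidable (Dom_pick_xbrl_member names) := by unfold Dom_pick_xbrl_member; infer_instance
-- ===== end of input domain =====

-- B replaces A's three full filtering passes by one pass keeping the first match per
-- priority tier with an early break on a tier-1 hit (objective: faster, constant factor).


-- tier predicates (shared vocabulary of both Pythons)
def pvTier1 (n : String) : Bool := PySem.Str.isIn "/PublicDoc/" n && PySem.Str.endswith n ".xbrl"
def pvTier2 (n : String) : Bool := PySem.Str.endswith n ".xbrl"
def pvTier3 (n : String) : Bool := PySem.Str.endswith n "_ixbrl.htm" || PySem.Str.endswith n "_ixbrl.html"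

-- ===== PORT A =====
-- Three list-comprehension passes; the final 'raise FileNotFoundError' branch is
-- excluded by Pre_, "" stands for no return value there.
def pick_xbrl_member (names : List String) : String :=
  let public_doc_xbrl := names.filter (fun name => pvTier1 name)
  match public_doc_xbrl with
  | x :: _ => x
  | [] =>
    let any_xbrl := names.filter (fun name => pvTier2 name)
    match any_xbrl with
    | x :: _ => x
    | [] =>
      let ixbrl_html := names.filter (fun name => pvTier3 name)
      match ixbrl_html with
      | x :: _ => x
      | [] => ""  -- raise FileNotFoundError: outside Pre_

-- ===== PORT B =====
-- single pass: loop state (t2, t3); a tier-1 hit returns (breaks) immediately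
def pickLoop : List String → Option String → Option String → Option String × Option String × Option String
  | [], t2, t3 => (none, t2, t3)
  | name :: rest, t2, t3 =>
    if pvTier1 name then (some name, t2, t3)   -- break
    else
      let t2' := if t2.isNone && pvTier2 name then some name else t2
      let t3' := if t3.isNone && pvTier3 name then some name else t3
      pickLoop rest t2' t3'

def pick_xbrl_member_alt (names : List String) : String :=
  match pickLoop names none none with
  | (some x, _, _) => x
  | (none, some x, _) => x
  | (none, none, some x) => x
  | (none, none, none) => ""  -- raise FileNotFoundError: outside Pre_

-- ===== PRECONDITION & SPEC =====
-- Pre_ excludes exactly the inputs with no XBRL/iXBRL member, on which A (and B) raise FileNotFoundError.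
def Pre_pick_xbrl_member (names : List String) : Prop :=
  (names.any (fun n => pvTier2 n || pvTier3 n)) = true
instance (names : List String) : Decidable (Pre_pick_xbrl_member names) := by unfold Pre_pick_xbrl_member; infer_instance
def pvWitness_pick_xbrl_member : List String := ["x/PublicDoc/a.xbrl", "b_ixbrl.htm"]

def Spec_pick_xbrl_member (names : List String) (out : String) : Prop := out = pick_xbrl_member_alt names
instance (names : List String) (out : String) : Decidable (Spec_pick_xbrl_member names out) := by unfold Spec_pick_xbrl_member; infer_instance

-- ===== CLAIM (what is proved, stated in full; the proofs are below) =====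
def Claim_equal_pick_xbrl_member : Prop := ∀ (names : List String), Dom_pick_xbrl_member names → Pre_pick_xbrl_member names → Spec_pick_xbrl_member names (pick_xbrl_member names)

-- ===== LEMMAS AND PROOFS =====

theorem pickLoop_fst (names : List String) (t2 t3 : Option String) :
    (pickLoop names t2 t3).1 = (names.filter (fun n => pvTier1 n)).head? := by
  induction names generalizing t2 t3 with
  | nil => rfl
  | cons n rest ih =>
    simp only [pickLoop, List.filter_cons]
    by_cases h : pvTier1 n = true <;> simp [h, ih]

theorem pickLoop_snd (names : List String) (t2 t3 : Option String)
    (h : names.filter (fun n => pvTier1 n) = []) :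
    (pickLoop names t2 t3).2.1 = t2.or (names.filter (fun n => pvTier2 n)).head? := by
  induction names generalizing t2 t3 with
  | nil => simp [pickLoop]
  | cons n rest ih =>
    simp only [List.filter_cons] at h
    by_cases h1 : pvTier1 n = true
    · simp [h1] at h
    · simp only [pickLoop, h1, Bool.false_eq_true, if_false]
      rw [ih _ _ (by simpa [h1] using h)]
      simp only [List.filter_cons]
      cases t2 with
      | some v => simp
      | none =>
        by_cases h2 : pvTier2 n = true <;> simp [h2]

theorem pickLoop_thd (names : List String) (t2 t3 : Option String)
    (h : names.filter (fun n => pvTier1 n) = []) :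
    (pickLoop names t2 t3).2.2 = t3.or (names.filter (fun n => pvTier3 n)).head? := by
  induction names generalizing t2 t3 with
  | nil => simp [pickLoop]
  | cons n rest ih =>
    simp only [List.filter_cons] at h
    by_cases h1 : pvTier1 n = true
    · simp [h1] at h
    · simp only [pickLoop, h1, Bool.false_eq_true, if_false]
      rw [ih _ _ (by simpa [h1] using h)]
      simp only [List.filter_cons]
      cases t3 with
      | some v => simp
      | none =>
        by_cases h3 : pvTier3 n = true <;> simp [h3]

-- ===== VERDICT (by name: the statement is the Claim_ definition above) =====
theorem pick_xbrl_member_spec : Claim_equal_pick_xbrl_member := by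
  intro names _ hpre
  unfold Spec_pick_xbrl_member pick_xbrl_member pick_xbrl_member_alt
  cases hf1 : names.filter (fun n => pvTier1 n) with
  | cons x xs =>
    have := pickLoop_fst names none none
    rw [hf1] at this
    simp only [List.head?] at this
    rcases hl : pickLoop names none none with ⟨a, b, c⟩
    rw [hl] at this; simp at this
    simp [this]
  | nil =>
    have h1 := pickLoop_fst names none none
    have h2 := pickLoop_snd names none none hf1
    have h3 := pickLoop_thd names none none hf1
    rw [hf1] at h1
    rcases hl : pickLoop names none none with ⟨a, b, c⟩
    rw [hl] at h1 h2 h3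
    simp only [List.head?_nil, Option.none_or] at h1 h2 h3
    subst h1
    cases hf2 : names.filter (fun n => pvTier2 n) with
    | cons y ys =>
      rw [hf2] at h2; simp only [List.head?_cons] at h2
      subst h2; simp
    | nil =>
      rw [hf2] at h2; simp only [List.head?_nil] at h2
      subst h2
      cases hf3 : names.filter (fun n => pvTier3 n) with
      | cons z zs =>
        rw [hf3] at h3; simp only [List.head?_cons] at h3
        subst h3; simp
      | nil =>
        -- contradicts Pre_
        exfalso
        unfold Pre_pick_xbrl_member at hpre
        rw [List.any_eq_true] at hpre
        obtain ⟨n, hn, hor⟩ := hpre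
        rcases Bool.or_eq_true .. |>.mp hor with h | h
        · have : n ∈ names.filter (fun n => pvTier2 n) := List.mem_filter.mpr ⟨hn, h⟩
          rw [hf2] at this; exact absurd this (List.not_mem_nil)
        · have : n ∈ names.filter (fun n => pvTier3 n) := List.mem_filter.mpr ⟨hn, h⟩
          rw [hf3] at this; exact absurd this (List.not_mem_nil)
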